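-- pv_equiv track=rewrite | github.com/oscarrobinson/py-advent-of-code | 2024_22/2024_22.py | get_nth_secret_number
-- ===== SOURCE A (Python) =====
-- def get_nth_secret_number(initial: int, n: int) -> int:
--     secret = initial
--     for _ in range(0, n):
--         step_1 = secret << 6  # multiply 64
--         step_2 = step_1 ^ secret  # mix
--         step_3 = step_2 % 16777216  # prune (16777216 is 2^24 so may be a more efficient modulo somehow)
--         step_4 = step_3 >> 5  # divide 32
--         step_5 = step_4 ^ step_3  # mix
--         step_6 = step_5 % 16777216  # prune
--         step_7 = step_6 << 11  # multiply 2048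
--         step_8 = step_7 ^ step_6  # mix
--         secret = step_8 % 16777216  # prune
--     return secret
-- ===== SOURCE B (Python) =====
-- # get_nth_secret_number via binary exponentiation of the GF(2)-linear step map
-- # (24 columns, one 24-bit mask each) instead of n scalar iterations.
-- _MOD = 16777216  # 2 ** 24
--
--
-- def _step(x):
--     x = (x ^ x * 64) % _MOD
--     x = (x ^ x // 32) % _MOD
--     return (x ^ x * 2048) % _MOD
--
--
-- _STEP_COLS = [_step(2 ** i) for i in range(24)]
-- _ID_COLS = [2 ** i for i in range(24)]
--
--
-- def _apply(cols, x):
--     y = 0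
--     for c in cols:
--         if x % 2 == 1:
--             y ^= c
--         x //= 2
--     return y
--
--
-- def _compose(m, cols):
--     return [_apply(m, c) for c in cols]
--
--
-- def get_nth_secret_number(initial: int, n: int) -> int:
--     if n <= 0:
--         return initial
--     x = _step(initial)  # one true step: the state is now a 24-bit value
--     m, p, k = _ID_COLS, _STEP_COLS, n - 1
--     while k > 0:
--         if k % 2 == 1:
--             m = _compose(p, m)
--         p = _compose(p, p)
--         k //= 2
--     return _apply(m, x)
-- ===== Notes on version B (the rewrite author's own statement) =====
-- stated objective: faster
-- what changed: A iterates the 24-bit xorshift step n times; B builds the step's 24x24 GF(2) bit-matrix (24 column masks) once, raises it to the (n-1)-th power by repeated squaring, and applies it to the state after one scalar step, replacing n scalar iterations by O(log n) matrix squarings.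
import Mathlib
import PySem

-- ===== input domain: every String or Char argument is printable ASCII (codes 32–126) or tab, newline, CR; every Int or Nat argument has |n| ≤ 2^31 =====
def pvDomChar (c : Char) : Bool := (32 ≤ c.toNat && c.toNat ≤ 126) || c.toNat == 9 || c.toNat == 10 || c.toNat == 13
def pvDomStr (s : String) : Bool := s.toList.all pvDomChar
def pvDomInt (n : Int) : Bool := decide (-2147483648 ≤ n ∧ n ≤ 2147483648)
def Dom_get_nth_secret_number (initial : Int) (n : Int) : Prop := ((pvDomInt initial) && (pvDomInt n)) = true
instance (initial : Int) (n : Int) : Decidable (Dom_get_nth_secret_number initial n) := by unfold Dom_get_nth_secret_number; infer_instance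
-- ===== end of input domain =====

-- B replaces A's n scalar PRNG iterations by binary exponentiation of the GF(2)-linear
-- step map (24 columns, one 24-bit mask each); objective: faster (O(log n) vs O(n) steps).

-- ===== PORT A =====
-- one pass of A's loop body (Python `<<`/`>>` are Lean's `<<<`/`>>>`; `^` is PySem.Int.bxor; `%` is PySem.Int.mod)
def pvStepA (secret : Int) : Int :=
  let step_1 := secret <<< (6 : Nat)
  let step_2 := PySem.Int.bxor step_1 secret
  let step_3 := PySem.Int.mod step_2 16777216
  let step_4 := step_3 >>> (5 : Nat)
  let step_5 := PySem.Int.bxor step_4 step_3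
  let step_6 := PySem.Int.mod step_5 16777216
  let step_7 := step_6 <<< (11 : Nat)
  let step_8 := PySem.Int.bxor step_7 step_6
  PySem.Int.mod step_8 16777216

def get_nth_secret_number (initial : Int) (n : Int) : Int :=
  (PySem.List.pyRange 0 n 1).foldl (fun secret _ => pvStepA secret) initial

-- ===== PORT B =====
-- Source B's `_step`
def pvStepB (x : Int) : Int :=
  let x1 := PySem.Int.mod (PySem.Int.bxor x (x * 64)) 16777216
  let x2 := PySem.Int.mod (PySem.Int.bxor x1 (PySem.Int.floordiv x1 32)) 16777216
  PySem.Int.mod (PySem.Int.bxor x2 (x2 * 2048)) 16777216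

-- Source B's `_STEP_COLS` / `_ID_COLS` (`2 ** i` with i drawn from range(24), so `.toNat` is exact)
def pvStepCols : List Int := (PySem.List.pyRange 0 24 1).map (fun i => pvStepB ((2 : Int) ^ i.toNat))
def pvIdCols : List Int := (PySem.List.pyRange 0 24 1).map (fun i => (2 : Int) ^ i.toNat)

-- Source B's `_apply`: fold over the columns carrying the pair (y, x)
def pvApply (cols : List Int) (x : Int) : Int :=
  (cols.foldl
    (fun (st : Int × Int) c =>
      (if PySem.Int.mod st.2 2 = 1 then PySem.Int.bxor st.1 c else st.1,
       PySem.Int.floordiv st.2 2))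
    ((0 : Int), x)).1

-- Source B's `_compose`
def pvCompose (m cols : List Int) : List Int := cols.map (fun c => pvApply m c)

-- Source B's `while k > 0: … k //= 2` loop; k = n-1 ≥ 0 there, so a Nat counter is exact
def pvPowLoop (m p : List Int) (k : Nat) : List Int :=
  if k = 0 then m
  else pvPowLoop (if k % 2 = 1 then pvCompose p m else m) (pvCompose p p) (k / 2)
termination_by k
decreasing_by omega

def get_nth_secret_number_alt (initial : Int) (n : Int) : Int :=
  if n ≤ 0 then initial
  else pvApply (pvPowLoop pvIdCols pvStepCols (n - 1).toNat) (pvStepB initial)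

-- ===== PRECONDITION & SPEC =====
def Spec_get_nth_secret_number (initial : Int) (n : Int) (out : Int) : Prop := out = get_nth_secret_number_alt initial n
instance (initial : Int) (n : Int) (out : Int) : Decidable (Spec_get_nth_secret_number initial n out) := by unfold Spec_get_nth_secret_number; infer_instance

-- ===== CLAIM (what is proved, stated in full; the proofs are below) =====
def Claim_equal_get_nth_secret_number : Prop := ∀ (initial : Int) (n : Int), Dom_get_nth_secret_number initial n → Spec_get_nth_secret_number initial n (get_nth_secret_number initial n)

-- ===== LEMMAS AND PROOFS =====

-- Nat model of one PRNG step (shape of A's loop body on a nonnegative state)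
def pvS1 (x : Nat) : Nat := ((x <<< 6) ^^^ x) % 16777216
def pvS2 (x : Nat) : Nat := ((x >>> 5) ^^^ x) % 16777216
def pvS3 (x : Nat) : Nat := ((x <<< 11) ^^^ x) % 16777216
def pvSN (x : Nat) : Nat := pvS3 (pvS2 (pvS1 x))

lemma pv_mod2_cast (x : Nat) : PySem.Int.mod (↑x) 2 = ↑(x % 2) := by
  exact_mod_cast PySem.Int.mod_natCast x 2

lemma pv_div2_cast (x : Nat) : PySem.Int.floordiv (↑x) 2 = ↑(x / 2) := by
  exact_mod_cast PySem.Int.floordiv_natCast x 2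

lemma pv_modM_cast (x : Nat) : PySem.Int.mod (↑x) 16777216 = ↑(x % 16777216) := by
  exact_mod_cast PySem.Int.mod_natCast x 16777216

lemma pv_div32_cast (x : Nat) : PySem.Int.floordiv (↑x) 32 = ↑(x / 32) := by
  exact_mod_cast PySem.Int.floordiv_natCast x 32

-- A's step on a cast is the Nat model
lemma pv_castA (m : Nat) : pvStepA (↑m : Int) = ↑(pvSN m) := by
  simp only [pvStepA, pvSN, pvS1, pvS2, pvS3, ← Int.natCast_shiftLeft, ← Int.natCast_shiftRight,
    PySem.Int.bxor_natCast, pv_modM_cast]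

lemma pv_stepA_bounds (x : Int) : 0 ≤ pvStepA x ∧ pvStepA x < 16777216 := by
  unfold pvStepA
  exact ⟨PySem.Int.mod_nonneg _ (by norm_num), PySem.Int.mod_lt _ (by norm_num)⟩

-- A's step and B's step are the same function (xor commutativity; shifts as mul/div)
-- A's step and B's step are the same function (xor commutativity; shifts as mul/div)
lemma pv_stepAB (x : Int) : pvStepA x = pvStepB x := by
  simp only [pvStepA, pvStepB]
  have e1 : PySem.Int.bxor (x <<< (6 : Nat)) x = PySem.Int.bxor x (x * 64) := by
    rw [Int.shiftLeft_eq]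
    norm_num [PySem.Int.bxor_comm]
  rw [e1]
  set t3 : Int := PySem.Int.mod (PySem.Int.bxor x (x * 64)) 16777216 with ht3
  have h3n : 0 ≤ t3 := PySem.Int.mod_nonneg _ (by norm_num)
  obtain ⟨t, ht⟩ : ∃ t : Nat, t3 = ↑t := ⟨t3.toNat, (Int.toNat_of_nonneg h3n).symm⟩
  have e2 : PySem.Int.bxor (t3 >>> (5 : Nat)) t3 = PySem.Int.bxor t3 (PySem.Int.floordiv t3 32) := by
    rw [ht, ← Int.natCast_shiftRight, pv_div32_cast, PySem.Int.bxor_natCast,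
      PySem.Int.bxor_natCast, Nat.shiftRight_eq_div_pow]
    norm_num [Nat.xor_comm]
  rw [e2]
  set t6 : Int := PySem.Int.mod (PySem.Int.bxor t3 (PySem.Int.floordiv t3 32)) 16777216 with ht6
  have e3 : PySem.Int.bxor (t6 <<< (11 : Nat)) t6 = PySem.Int.bxor t6 (t6 * 2048) := by
    rw [Int.shiftLeft_eq]
    norm_num [PySem.Int.bxor_comm]
  rw [e3]

lemma pv_castB (m : Nat) : pvStepB (↑m : Int) = ↑(pvSN m) := by
  rw [← pv_stepAB, pv_castA]

-- the Nat step is GF(2)-linear (xor-additive)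
lemma pv_modM_xor (x y : Nat) : (x ^^^ y) % 16777216 = x % 16777216 ^^^ y % 16777216 := by
  have e : ∀ z : Nat, z % 16777216 = z &&& 16777215 := by
    intro z
    have := Nat.and_two_pow_sub_one_eq_mod z 24
    norm_num at this
    omega
  rw [e, e, e, Nat.and_xor_distrib_right]

lemma pv_stage_xor (f : Nat → Nat) (hf : ∀ x y, f (x ^^^ y) = f x ^^^ f y) (x y : Nat) :
    (f (x ^^^ y) ^^^ (x ^^^ y)) % 16777216
      = (f x ^^^ x) % 16777216 ^^^ (f y ^^^ y) % 16777216 := by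
  rw [← pv_modM_xor, hf]
  congr 1
  simp [Nat.xor_comm, Nat.xor_left_comm]

lemma pv_s1_xor (a b : Nat) : pvS1 (a ^^^ b) = pvS1 a ^^^ pvS1 b :=
  pv_stage_xor (· <<< 6) (fun _ _ => Nat.shiftLeft_xor_distrib) a b

lemma pv_s2_xor (a b : Nat) : pvS2 (a ^^^ b) = pvS2 a ^^^ pvS2 b :=
  pv_stage_xor (· >>> 5) (fun _ _ => Nat.shiftRight_xor_distrib) a b

lemma pv_s3_xor (a b : Nat) : pvS3 (a ^^^ b) = pvS3 a ^^^ pvS3 b :=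
  pv_stage_xor (· <<< 11) (fun _ _ => Nat.shiftLeft_xor_distrib) a b

lemma pv_sN_xor (a b : Nat) : pvSN (a ^^^ b) = pvSN a ^^^ pvSN b := by
  unfold pvSN
  rw [pv_s1_xor, pv_s2_xor, pv_s3_xor]

lemma pv_sN_lt (x : Nat) : pvSN x < 16777216 := by
  unfold pvSN pvS3
  exact Nat.mod_lt _ (by norm_num)

-- 2^s ^^^ q*2^(s+1) is the odd multiple (2q+1)*2^s: disjoint bit ranges
lemma pv_xor_odd (q s : Nat) : 2 ^ s ^^^ q * 2 ^ (s + 1) = (2 * q + 1) * 2 ^ s := by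
  have h1 : (1 : Nat) ^^^ 2 * q = 2 * q + 1 := by
    rw [Nat.xor_comm]
    apply Nat.eq_of_testBit_eq
    intro i
    cases i with
    | zero => simp
    | succ j => simp [Nat.testBit_succ]
  calc 2 ^ s ^^^ q * 2 ^ (s + 1)
      = 1 <<< s ^^^ (2 * q) <<< s := by
        rw [Nat.shiftLeft_eq, Nat.shiftLeft_eq]
        congr 1
        · ring
        · ring
    _ = ((1 : Nat) ^^^ 2 * q) <<< s := Nat.shiftLeft_xor_distrib.symm
    _ = (2 * q + 1) * 2 ^ s := by rw [h1, Nat.shiftLeft_eq]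

-- the `_apply` fold computes g on a 24-bit input from g's values on the basis bits
lemma pv_apply_fold (g : Nat → Nat) (hg : ∀ a b, g (a ^^^ b) = g a ^^^ g b) :
    ∀ (L s x w : Nat), x < 2 ^ L →
      (((List.range L).map (fun j => (↑(g (2 ^ (s + j))) : Int))).foldl
        (fun (st : Int × Int) c =>
          (if PySem.Int.mod st.2 2 = 1 then PySem.Int.bxor st.1 c else st.1,
           PySem.Int.floordiv st.2 2))
        ((↑w : Int), (↑x : Int))).1
      = ↑(w ^^^ g (x * 2 ^ s)) := by
  have hg0 : g 0 = 0 := by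
    have := hg 0 0
    simp at this
    omega
  intro L
  induction L with
  | zero =>
    intro s x w hx
    interval_cases x
    simp [hg0]
  | succ L ih =>
    intro s x w hx
    rw [List.range_succ_eq_map, List.map_cons, List.map_map, List.foldl_cons]
    have hcols : (List.range L).map ((fun j => (↑(g (2 ^ (s + j))) : Int)) ∘ Nat.succ)
        = (List.range L).map (fun j => (↑(g (2 ^ (s + 1 + j))) : Int)) := by
      apply List.map_congr_left
      intro j _
      have e : s + Nat.succ j = s + 1 + j := by omega
      simp [Function.comp, e]
    have hx2 : x / 2 < 2 ^ L := by
      have h2 : (2 : Nat) ^ (L + 1) = 2 * 2 ^ L := by ring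
      omega
    have hpow : (2 : Nat) ^ (s + 1) = 2 ^ s * 2 := by ring
    rcases Nat.mod_two_eq_zero_or_one x with hpar | hpar
    · -- even: the head column is skipped
      have hne : ¬ PySem.Int.mod (↑x) 2 = 1 := by
        rw [pv_mod2_cast, hpar]; norm_num
      rw [if_neg hne, pv_div2_cast, hcols, ih (s + 1) (x / 2) w hx2]
      have hxe : x = 2 * (x / 2) := by omega
      have harg : x / 2 * 2 ^ (s + 1) = x * 2 ^ s := by
        calc x / 2 * 2 ^ (s + 1) = 2 * (x / 2) * 2 ^ s := by rw [hpow]; ring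
          _ = x * 2 ^ s := by rw [← hxe]
      rw [harg]
    · -- odd: xor in the head column
      have heq : PySem.Int.mod (↑x) 2 = 1 := by
        rw [pv_mod2_cast, hpar]; norm_num
      rw [if_pos heq, pv_div2_cast, hcols, PySem.Int.bxor_natCast,
        ih (s + 1) (x / 2) (w ^^^ g (2 ^ (s + 0))) hx2]
      congr 1
      rw [Nat.add_zero, Nat.xor_assoc, ← hg, pv_xor_odd (x / 2) s]
      have hxe : 2 * (x / 2) + 1 = x := by omega
      rw [hxe]

-- columns j = g(2^j) for j < 24
def pvFormCols (cols : List Int) (g : Nat → Nat) : Prop :=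
  cols = (List.range 24).map fun j => (↑(g (2 ^ j)) : Int)

lemma pv_apply_spec (g : Nat → Nat) (hg : ∀ a b, g (a ^^^ b) = g a ^^^ g b)
    (cols : List Int) (hc : pvFormCols cols g) (x : Nat) (hx : x < 2 ^ 24) :
    pvApply cols (↑x) = ↑(g x) := by
  unfold pvApply
  rw [hc]
  have : ((List.range 24).map fun j => (↑(g (2 ^ j)) : Int))
      = (List.range 24).map fun j => (↑(g (2 ^ (0 + j))) : Int) := by simp
  rw [this]
  have h := pv_apply_fold g hg 24 0 x 0 hx
  simpa using h

lemma pv_formCols_congr {cols : List Int} {F G : Nat → Nat}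
    (h : pvFormCols cols F) (he : ∀ x, F x = G x) : pvFormCols cols G := by
  unfold pvFormCols at *
  rw [h]
  simp [he]

lemma pv_compose_form (f g : Nat → Nat) (hg : ∀ a b, g (a ^^^ b) = g a ^^^ g b)
    (hfB : ∀ x, x < 2 ^ 24 → f x < 2 ^ 24)
    (m cols : List Int) (hm : pvFormCols m g) (hc : pvFormCols cols f) :
    pvFormCols (pvCompose m cols) (fun x => g (f x)) := by
  unfold pvCompose pvFormCols
  rw [hc, List.map_map]
  apply List.map_congr_left
  intro j hj
  simp only [Function.comp]
  rw [pv_apply_spec g hg m hm (f (2 ^ j))]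
  exact hfB _ (Nat.pow_lt_pow_right (by norm_num) (List.mem_range.mp hj))

lemma pv_powLoop_form : ∀ (k : Nat) (m p : List Int) (f g : Nat → Nat),
    (∀ a b, f (a ^^^ b) = f a ^^^ f b) → (∀ x, x < 2 ^ 24 → f x < 2 ^ 24) →
    (∀ a b, g (a ^^^ b) = g a ^^^ g b) → (∀ x, x < 2 ^ 24 → g x < 2 ^ 24) →
    pvFormCols m f → pvFormCols p g →
    pvFormCols (pvPowLoop m p k) (fun x => g^[k] (f x)) := by
  intro k
  induction k using Nat.strong_induction_on with
  | _ k ih =>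
    intro m p f g hf hfB hg hgB hm hp
    rw [pvPowLoop]
    by_cases hk : k = 0
    · subst hk
      rw [if_pos rfl]
      exact pv_formCols_congr hm (by simp)
    · rw [if_neg hk]
      have hgg : ∀ a b, (fun x => g (g x)) (a ^^^ b) = (fun x => g (g x)) a ^^^ (fun x => g (g x)) b := by
        intro a b; simp [hg]
      have hggB : ∀ x, x < 2 ^ 24 → (fun x => g (g x)) x < 2 ^ 24 := by
        intro x hx; exact hgB _ (hgB _ hx)
      have hpp : pvFormCols (pvCompose p p) (fun x => g (g x)) :=
        pv_compose_form g g hg hgB p p hp hp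
      have hiter : ∀ r x, (fun y => g (g y))^[k / 2] (g^[r] (f x)) = g^[k / 2 * 2 + r] (f x) := by
        intro r x
        have h2 : (fun y => g (g y)) = g^[2] := by
          funext y
          simp [Function.iterate_succ_apply']
        rw [h2, ← Function.iterate_mul, Nat.mul_comm (k / 2) 2, ← Function.iterate_add_apply,
          Nat.mul_comm 2 (k / 2)]
      rcases Nat.mod_two_eq_zero_or_one k with hpar | hpar
      · rw [if_neg (by omega)]
        have := ih (k / 2) (by omega) m (pvCompose p p) f (fun x => g (g x)) hf hfB hgg hggB hm hpp
        refine pv_formCols_congr this ?_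
        intro x
        have := hiter 0 x
        simp only [Function.iterate_zero, id] at this
        rw [this]
        congr 1
        omega
      · rw [if_pos (by omega)]
        have hpm : pvFormCols (pvCompose p m) (fun x => g (f x)) :=
          pv_compose_form f g hg hfB p m hp hm
        have hgf : ∀ a b, (fun x => g (f x)) (a ^^^ b) = (fun x => g (f x)) a ^^^ (fun x => g (f x)) b := by
          intro a b; simp [hf, hg]
        have hgfB : ∀ x, x < 2 ^ 24 → (fun x => g (f x)) x < 2 ^ 24 := by
          intro x hx; exact hgB _ (hfB _ hx)
        have := ih (k / 2) (by omega) (pvCompose p m) (pvCompose p p)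
          (fun x => g (f x)) (fun x => g (g x)) hgf hgfB hgg hggB hpm hpp
        refine pv_formCols_congr this ?_
        intro x
        have h1 : (fun y => g (g y))^[k / 2] (g (f x)) = g^[k / 2 * 2 + 1] (f x) := by
          have := hiter 1 x
          simpa using this
        rw [h1]
        congr 1
        omega

-- forms of the two initial column sets
lemma pv_idCols_form : pvFormCols pvIdCols (fun x => x) := by
  unfold pvIdCols pvFormCols
  rw [show ((24 : Int)) = ((24 : Nat) : Int) by norm_num, PySem.List.pyRange_zero_nat,
    List.map_map]
  apply List.map_congr_left
  intro j _
  simp only [Function.comp]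
  push_cast
  simp

lemma pv_stepCols_form : pvFormCols pvStepCols pvSN := by
  unfold pvStepCols pvFormCols
  rw [show ((24 : Int)) = ((24 : Nat) : Int) by norm_num, PySem.List.pyRange_zero_nat,
    List.map_map]
  apply List.map_congr_left
  intro j _
  simp only [Function.comp, Int.toNat_natCast]
  rw [show ((2 : Int) ^ j) = ((2 ^ j : Nat) : Int) by push_cast; ring, pv_castB]

-- folding A's loop is function iteration
lemma pv_foldl_iterate (F : Int → Int) :
    ∀ (l : List Int) (x : Int), l.foldl (fun s _ => F s) x = F^[l.length] x := by
  intro l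
  induction l with
  | nil => simp
  | cons h t ih =>
    intro x
    simp only [List.foldl_cons, List.length_cons, ih, Function.iterate_succ_apply]

lemma pv_iterate_cast (k m : Nat) : pvStepA^[k] (↑m : Int) = ↑(pvSN^[k] m) := by
  induction k generalizing m with
  | zero => simp
  | succ k ih =>
    rw [Function.iterate_succ_apply, Function.iterate_succ_apply, pv_castA, ih]

lemma pv_sN_iter_xor (k : Nat) : ∀ a b, pvSN^[k] (a ^^^ b) = pvSN^[k] a ^^^ pvSN^[k] b := by
  induction k with
  | zero => simp
  | succ k ih =>
    intro a b
    rw [Function.iterate_succ_apply, Function.iterate_succ_apply,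
      Function.iterate_succ_apply, pv_sN_xor, ih]

lemma pv_main (initial n : Int) :
    get_nth_secret_number initial n = get_nth_secret_number_alt initial n := by
  unfold get_nth_secret_number get_nth_secret_number_alt
  by_cases hn : n ≤ 0
  · rw [PySem.List.pyRange_one_eq_nil hn, if_pos hn]
    simp
  · rw [if_neg hn]
    rw [pv_foldl_iterate pvStepA, PySem.List.length_pyRange_one]
    have hk : (n - 0).toNat = (n - 1).toNat + 1 := by omega
    rw [hk, Function.iterate_succ_apply]
    set k := (n - 1).toNat
    obtain ⟨hA0, hAlt⟩ := pv_stepA_bounds initial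
    set m0 : Nat := (pvStepA initial).toNat with hm0def
    have hA : pvStepA initial = ↑m0 := (Int.toNat_of_nonneg hA0).symm
    have hm0 : m0 < 2 ^ 24 := by
      have : ((2 : Int) ^ 24) = 16777216 := by norm_num
      omega
    have hB : pvStepB initial = ↑m0 := by rw [← pv_stepAB, hA]
    rw [hA, hB, pv_iterate_cast]
    have hform : pvFormCols (pvPowLoop pvIdCols pvStepCols k) (fun x => pvSN^[k] ((fun y => y) x)) :=
      pv_powLoop_form k pvIdCols pvStepCols (fun x => x) pvSN
        (fun _ _ => rfl) (fun _ hx => hx) pv_sN_xor (fun x _ => pv_sN_lt x)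
        pv_idCols_form pv_stepCols_form
    rw [pv_apply_spec (fun x => pvSN^[k] x) (pv_sN_iter_xor k)
      (pvPowLoop pvIdCols pvStepCols k) hform m0 hm0]

-- ===== VERDICT (by name: the statement is the Claim_ definition above) =====
theorem get_nth_secret_number_spec : Claim_equal_get_nth_secret_number := by
  intro initial n _
  unfold Spec_get_nth_secret_number
  exact pv_main initial n
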